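-- pv_equiv track=rewrite | github.com/poojakose/CodingBat | sum13.py | Msum13
-- ===== SOURCE A (Python) =====
-- def Msum13(nums):
--   sum = 0
--   for i in range(len(nums)):
--     if nums[i] == 13 or (i>0 and nums[i-1]==13):
--       i += 2
--       continue
--     sum += nums[i]
--   return sum
-- ===== SOURCE B (Python) =====
-- def Msum13(nums):
--   # pass 1: build the set of indices to ignore (each 13 and the position after it)
--   skip = set()
--   for i, n in enumerate(nums):
--     if n == 13:
--       skip.add(i)
--       skip.add(i + 1)
--   # pass 2: sum the elements whose index was not marked
--   return sum(n for i, n in enumerate(nums) if i not in skip)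
-- ===== Notes on version B (the rewrite author's own statement) =====
-- stated objective: alternative
-- what changed: Replaces A's single index-walking pass with a lookback at nums[i-1] by a staged two-pass algorithm: a first pass builds a skip-index set {i, i+1 : nums[i]==13}, and a second pass sums the elements whose index is not in that set.
import Mathlib
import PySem

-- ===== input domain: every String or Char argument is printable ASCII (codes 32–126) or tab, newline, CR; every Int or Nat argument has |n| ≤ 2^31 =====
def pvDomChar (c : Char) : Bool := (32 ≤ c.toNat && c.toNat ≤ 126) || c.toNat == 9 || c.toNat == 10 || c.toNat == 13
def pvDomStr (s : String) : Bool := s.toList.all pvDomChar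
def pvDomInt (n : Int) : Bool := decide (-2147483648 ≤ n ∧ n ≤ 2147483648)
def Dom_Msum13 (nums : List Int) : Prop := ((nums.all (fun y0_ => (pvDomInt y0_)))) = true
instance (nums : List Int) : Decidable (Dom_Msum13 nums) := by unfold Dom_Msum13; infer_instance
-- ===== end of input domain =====

-- B replaces A's single index-walking pass (lookback at nums[i-1]) by two staged passes:
-- first build the set of skip indices {i, i+1 : nums[i] = 13}, then sum the unmarked elements.

-- ===== PORT A =====
-- Literal port of A's index loop; the `i += 2; continue` only skips the body (the
-- reassignment of i has no effect on Python's range iteration), ported as the if-skip.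
def Msum13 (nums : List Int) : Int :=
  (PySem.List.pyRange 0 (nums.length : Int) 1).foldl
    (fun s i =>
      if PySem.List.pyGetD nums i 0 = 13 ∨ (i > 0 ∧ PySem.List.pyGetD nums (i - 1) 0 = 13) then s
      else s + PySem.List.pyGetD nums i 0) 0

-- ===== PORT B =====
-- pass 1 of Source B: the skip-index set
def pvSkip (nums : List Int) : PySem.Set Int :=
  (PySem.List.enumerate nums 0).foldl
    (fun st p => if p.2 = 13 then PySem.Set.add (PySem.Set.add st p.1) (p.1 + 1) else st)
    PySem.Set.empty

-- pass 2 of Source B: sum over enumerate filtering indices not in the set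
def Msum13_alt (nums : List Int) : Int :=
  (PySem.List.enumerate nums 0).foldl
    (fun acc p => if PySem.Set.contains (pvSkip nums) p.1 then acc else acc + p.2) 0

-- ===== PRECONDITION & SPEC =====
def Spec_Msum13 (nums : List Int) (out : Int) : Prop := out = Msum13_alt nums
instance (nums : List Int) (out : Int) : Decidable (Spec_Msum13 nums out) := by unfold Spec_Msum13; infer_instance

-- ===== CLAIM =====
def Claim_equal_Msum13 : Prop := ∀ (nums : List Int), Dom_Msum13 nums → Spec_Msum13 nums (Msum13 nums)

-- ===== LEMMAS AND PROOFS =====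

-- characterisation of the skip-set fold, generalised over start index and initial set
lemma skip_fold_mem (nums : List Int) : ∀ (s : Int) (t : PySem.Set Int) (x : Int),
    x ∈ (PySem.List.enumerate nums s).foldl
        (fun st p => if p.2 = 13 then PySem.Set.add (PySem.Set.add st p.1) (p.1 + 1) else st) t
    ↔ x ∈ t ∨ ∃ (k : Nat) (h : k < nums.length), nums[k] = 13 ∧ (x = s + k ∨ x = s + k + 1) := by
  induction nums with
  | nil => intro s t x; simp [PySem.List.enumerate_nil]
  | cons n tl ih =>
    intro s t x
    rw [PySem.List.enumerate_cons, List.foldl_cons]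
    by_cases hn : n = 13
    · rw [if_pos (by simpa using hn), ih]
      simp only [PySem.Set.mem_add]
      constructor
      · rintro (((hmem | rfl) | rfl) | ⟨k, hk, h13, hx⟩)
        · exact Or.inl hmem
        · exact Or.inr ⟨0, by simp, by simpa using hn, Or.inl (by simp)⟩
        · exact Or.inr ⟨0, by simp, by simpa using hn, Or.inr (by simp)⟩
        · refine Or.inr ⟨k + 1, by simpa using hk, by simpa using h13, ?_⟩
          rcases hx with h | h
          · left; push_cast at h ⊢; omega
          · right; push_cast at h ⊢; omega
      · rintro (hmem | ⟨k, hk, h13, hx⟩)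
        · exact Or.inl (Or.inl (Or.inl hmem))
        · match k, hk with
          | 0, _ =>
            simp only [Nat.cast_zero, add_zero] at hx
            rcases hx with rfl | rfl
            · exact Or.inl (Or.inl (Or.inr rfl))
            · exact Or.inl (Or.inr rfl)
          | k' + 1, hk =>
            refine Or.inr ⟨k', by simpa using hk, by simpa using h13, ?_⟩
            rcases hx with h | h
            · left; push_cast at h ⊢; omega
            · right; push_cast at h ⊢; omega
    · rw [if_neg (by simpa using hn), ih]
      constructor
      · rintro (hmem | ⟨k, hk, h13, hx⟩)
        · exact Or.inl hmem
        · refine Or.inr ⟨k + 1, by simpa using hk, by simpa using h13, ?_⟩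
          rcases hx with h | h
          · left; push_cast at h ⊢; omega
          · right; push_cast at h ⊢; omega
      · rintro (hmem | ⟨k, hk, h13, hx⟩)
        · exact Or.inl hmem
        · match k, hk with
          | 0, _ => exact absurd (by simpa using h13) hn
          | k' + 1, hk =>
            refine Or.inr ⟨k', by simpa using hk, by simpa using h13, ?_⟩
            rcases hx with h | h
            · left; push_cast at h ⊢; omega
            · right; push_cast at h ⊢; omega

lemma mem_pvSkip_iff (nums : List Int) (i : Int) (h0 : 0 ≤ i) (hlt : i < (nums.length : Int)) :
    i ∈ pvSkip nums
    ↔ (PySem.List.pyGetD nums i 0 = 13 ∨ (i > 0 ∧ PySem.List.pyGetD nums (i - 1) 0 = 13)) := by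
  unfold pvSkip
  rw [skip_fold_mem]
  constructor
  · rintro (hmem | ⟨k, hk, h13, hx | hx⟩)
    · simp [PySem.Set.empty] at hmem
    · left
      rw [PySem.List.pyGetD_eq_getElem nums 0 h0 (by exact_mod_cast hlt)]
      have hIdx : i.toNat = k := by omega
      simp only [hIdx]; exact h13
    · right
      refine ⟨by omega, ?_⟩
      rw [PySem.List.pyGetD_eq_getElem nums 0 (by omega) (by omega)]
      have hIdx : (i - 1).toNat = k := by omega
      simp only [hIdx]; exact h13
  · rintro (h13 | ⟨hpos, h13⟩)
    · refine Or.inr ⟨i.toNat, by omega, ?_, Or.inl (by omega)⟩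
      rw [PySem.List.pyGetD_eq_getElem nums 0 h0 (by exact_mod_cast hlt)] at h13
      exact h13
    · refine Or.inr ⟨(i - 1).toNat, by omega, ?_, Or.inr (by omega)⟩
      rw [PySem.List.pyGetD_eq_getElem nums 0 (by omega) (by omega)] at h13
      exact h13

lemma alt_eq_a (nums : List Int) : Msum13_alt nums = Msum13 nums := by
  unfold Msum13_alt Msum13
  rw [PySem.List.enumerate_eq_map_pyRange nums 0, List.foldl_map]
  apply PySem.List.foldl_congr_mem
  intro acc i hi
  rw [PySem.List.mem_pyRange_one] at hi
  by_cases hc : PySem.List.pyGetD nums i 0 = 13 ∨ (i > 0 ∧ PySem.List.pyGetD nums (i - 1) 0 = 13)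
  · have ht : PySem.Set.contains (pvSkip nums) i = true :=
      (PySem.Set.contains_iff _ _).mpr ((mem_pvSkip_iff nums i hi.1 hi.2).mpr hc)
    rw [if_pos hc, if_pos ht]
  · have hf : ¬ PySem.Set.contains (pvSkip nums) i = true := by
      intro h
      exact hc ((mem_pvSkip_iff nums i hi.1 hi.2).mp ((PySem.Set.contains_iff _ _).mp h))
    rw [if_neg hc, if_neg hf]

-- ===== VERDICT =====
theorem Msum13_spec : Claim_equal_Msum13 := by
  intro nums _
  unfold Spec_Msum13
  exact (alt_eq_a nums).symm
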